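-- pv_equiv track=rewrite | github.com/ChoiwahChow/p9m4 | utils/mace4/invariants.py | calc_unary_invariant_vec
-- ===== SOURCE A (Python) =====
-- def calc_unary_invariant_vec(radius, mt):
--     """
--     Args:
--         radius (int): radius of the cube
--         mt (List[int]: multiplication table
--     Returns:
--         (List[List[int]]):
--     """
--     inv_vec = list()
--     for el in range(0, radius+1):
--         inv_vec.append(list())
--
--     for el in range(0, radius+1):
--         # Invariant U1
--         if mt[el] == el:
--             inv_vec[el].append(1)
--         else:
--             inv_vec[el].append(0)
--         # Invariant U3
--         inv_vec[el].append(len(set([y for y in range(0, radius+1) if mt[y] == el])))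
--
--     return inv_vec
-- ===== SOURCE B (Python) =====
-- def calc_unary_invariant_vec(radius, mt):
--     counts = {}
--     for el in range(radius + 1):
--         v = mt[el]
--         counts[v] = counts.get(v, 0) + 1
--     return [[1 if mt[el] == el else 0, counts.get(el, 0)]
--             for el in range(radius + 1)]
-- ===== Notes on version B (the rewrite author's own statement) =====
-- stated objective: faster
-- what changed: Replaces the per-element set-comprehension scan (a full range scan per element) by one dictionary pass that counts every element's preimages, then a single output pass.
import Mathlib
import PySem

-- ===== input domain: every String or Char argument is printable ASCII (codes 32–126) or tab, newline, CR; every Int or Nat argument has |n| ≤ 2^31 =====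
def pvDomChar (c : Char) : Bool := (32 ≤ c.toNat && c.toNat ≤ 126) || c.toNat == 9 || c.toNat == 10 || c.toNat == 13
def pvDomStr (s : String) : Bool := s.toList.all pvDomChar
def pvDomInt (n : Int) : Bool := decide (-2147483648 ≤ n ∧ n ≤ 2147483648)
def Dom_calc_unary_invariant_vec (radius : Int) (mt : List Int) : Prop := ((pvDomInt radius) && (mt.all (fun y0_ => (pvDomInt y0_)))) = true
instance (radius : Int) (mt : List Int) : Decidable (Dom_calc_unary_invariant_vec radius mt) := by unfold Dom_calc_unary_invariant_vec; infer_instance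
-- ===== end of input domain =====

-- B replaces A's per-element preimage scan by one counting-dict pass (objective: faster).


-- ===== PORT A =====
-- the loop body of A: append invariant U1 then invariant U3 to inv[el]
def pvStepA (mt rng : List Int) (inv : List (List Int)) (el : Int) : List (List Int) :=
  let inv1 := PySem.List.pySetD inv el (PySem.List.pyGetD inv el [] ++
    [if PySem.List.pyGetD mt el 0 = el then (1 : Int) else 0])
  PySem.List.pySetD inv1 el (PySem.List.pyGetD inv1 el [] ++
    [((PySem.Set.ofList (rng.filter (fun y => PySem.List.pyGetD mt y 0 == el))).length : Int)])

def calc_unary_invariant_vec (radius : Int) (mt : List Int) : List (List Int) :=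
  -- inv_vec starts as radius+1 empty lists; the second loop fills them
  (PySem.List.pyRange 0 (radius + 1) 1).foldl
    (pvStepA mt (PySem.List.pyRange 0 (radius + 1) 1))
    ((PySem.List.pyRange 0 (radius + 1) 1).map (fun _ => ([] : List Int)))

-- ===== PORT B =====
-- first pass of B: count the preimages of every element under mt
def pvCountsB (radius : Int) (mt : List Int) : PySem.Dict Int Int :=
  (PySem.List.pyRange 0 (radius + 1) 1).foldl (fun d el =>
    d.insert (PySem.List.pyGetD mt el 0)
      (d.getD (PySem.List.pyGetD mt el 0) 0 + 1)) PySem.Dict.empty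

def calc_unary_invariant_vec_alt (radius : Int) (mt : List Int) : List (List Int) :=
  (PySem.List.pyRange 0 (radius + 1) 1).map (fun el =>
    [if PySem.List.pyGetD mt el 0 = el then (1 : Int) else 0,
     (pvCountsB radius mt).getD el 0])

-- ===== PRECONDITION & SPEC =====
-- A (and B alike) raise IndexError when 0 ≤ radius and mt has fewer than radius+1 entries; Pre_ excludes exactly those inputs.
def Pre_calc_unary_invariant_vec (radius : Int) (mt : List Int) : Prop :=
  radius < 0 ∨ radius + 1 ≤ (mt.length : Int)
instance (radius : Int) (mt : List Int) : Decidable (Pre_calc_unary_invariant_vec radius mt) := by unfold Pre_calc_unary_invariant_vec; infer_instance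
def pvWitness_calc_unary_invariant_vec : Int × List Int := (2, [1, 0, 2])
def Spec_calc_unary_invariant_vec (radius : Int) (mt : List Int) (out : List (List Int)) : Prop := out = calc_unary_invariant_vec_alt radius mt
instance (radius : Int) (mt : List Int) (out : List (List Int)) : Decidable (Spec_calc_unary_invariant_vec radius mt out) := by unfold Spec_calc_unary_invariant_vec; infer_instance

-- ===== CLAIM (what is proved, stated in full; the proofs are below) =====
def Claim_equal_calc_unary_invariant_vec : Prop := ∀ (radius : Int) (mt : List Int), Dom_calc_unary_invariant_vec radius mt → Pre_calc_unary_invariant_vec radius mt → Spec_calc_unary_invariant_vec radius mt (calc_unary_invariant_vec radius mt)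

-- ===== LEMMAS AND PROOFS =====

-- the value A's loop writes into slot el
def pvRowA (mt rng : List Int) (el : Int) : List Int :=
  [if PySem.List.pyGetD mt el 0 = el then (1 : Int) else 0,
   ((PySem.Set.ofList (rng.filter (fun y => PySem.List.pyGetD mt y 0 == el))).length : Int)]

-- A's loop writes each slot once: folding the write-step over range(0,k) turns the
-- k first empty slots of an n-slot vector into pvRowA.
theorem pvFoldA (mt rng : List Int) (n : Nat) :
    ∀ k : Nat, k ≤ n →
    (PySem.List.pyRange 0 (k : Int) 1).foldl (pvStepA mt rng)
      ((List.range n).map (fun _ => ([] : List Int)))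
    = (List.range n).map (fun i => if i < k then pvRowA mt rng (i : Int) else []) := by
  intro k hk
  induction k with
  | zero =>
    rw [PySem.List.pyRange_one_eq_nil (by norm_num)]
    simp
  | succ k ih =>
    have hk' : k ≤ n := Nat.le_of_succ_le hk
    have hkn : k < n := hk
    have hsplit : PySem.List.pyRange 0 ((k + 1 : Nat) : Int) 1
        = PySem.List.pyRange 0 (k : Int) 1 ++ [(k : Int)] := by
      push_cast
      exact PySem.List.pyRange_one_succ_right (by positivity)
    rw [hsplit, List.foldl_append, ih hk']
    simp only [List.foldl_cons, List.foldl_nil, pvStepA,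
      PySem.List.pyGetD_natCast, PySem.List.pySetD_natCast]
    have hlen : ((List.range n).map
        (fun i => if i < k then pvRowA mt rng (i : Int) else [])).length = n := by simp
    have hget : ((List.range n).map
        (fun i => if i < k then pvRowA mt rng (i : Int) else [])).getD k []
        = [] := by
      rw [List.getD_eq_getElem _ _ (by simp [hkn])]
      simp
    rw [hget, List.nil_append]
    have hget2 : (((List.range n).map
        (fun i => if i < k then pvRowA mt rng (i : Int) else [])).set k
          [if mt.getD k 0 = (k : Int) then (1 : Int) else 0]).getD k []
        = [if mt.getD k 0 = (k : Int) then (1 : Int) else 0] := by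
      rw [List.getD_eq_getElem _ _ (by simp [hlen, hkn])]
      rw [List.getElem_set_self]
    rw [hget2, List.set_set]
    apply List.ext_getElem
    · simp
    · intro i h1 h2
      simp only [List.length_set, hlen] at h1
      rw [List.getElem_set, List.getElem_map, List.getElem_map]
      simp only [List.getElem_range]
      by_cases hik : k = i
      · subst hik
        simp [pvRowA, PySem.List.pyGetD_natCast]
      · rw [if_neg hik]
        have hik' : i ≠ k := fun h => hik h.symm
        have : i < k ↔ i < k + 1 := by omega
        simp [this]

-- length of a filter is the count of the image value in the mapped list
theorem pvCountAux (g : Int → Int) (el : Int) : ∀ l : List Int,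
    (l.filter (fun y => g y == el)).length = (l.map g).count el := by
  intro l
  induction l with
  | nil => rfl
  | cons x xs ih =>
    simp only [List.filter_cons, List.map_cons, List.count_cons, ← ih]
    by_cases h : (g x == el) = true
    · simp [h]
    · simp [h]

-- count of el among the images g y, y ∈ rng, equals the length of the deduplicated
-- preimage list A builds (preimages taken from a duplicate-free rng are distinct).
theorem pvCount (rng : List Int) (hnd : rng.Nodup) (g : Int → Int) (el : Int) :
    ((PySem.Set.ofList (rng.filter (fun y => g y == el))).length : Int)
    = (rng.map g).count el := by
  have hndf : (rng.filter (fun y => g y == el)).Nodup := hnd.filter _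
  have hnds : (PySem.Set.ofList (rng.filter (fun y => g y == el))).Nodup :=
    PySem.Set.nodup_ofList _
  have hperm : (PySem.Set.ofList (rng.filter (fun y => g y == el))).Perm
      (rng.filter (fun y => g y == el)) := by
    rw [List.perm_ext_iff_of_nodup hnds hndf]
    intro x
    exact PySem.Set.mem_ofList _ x
  rw [hperm.length_eq, pvCountAux g el rng]

-- B's counting dict looked up at el is the number of preimages of el in the range
theorem pvCountsB_getD (radius : Int) (mt : List Int) (el : Int) :
    (pvCountsB radius mt).getD el 0
    = ((PySem.List.pyRange 0 (radius + 1) 1).map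
        (fun y => PySem.List.pyGetD mt y 0)).count el := by
  unfold pvCountsB
  have hB : (PySem.List.pyRange 0 (radius + 1) 1).foldl (fun d el =>
        d.insert (PySem.List.pyGetD mt el 0)
          (d.getD (PySem.List.pyGetD mt el 0) 0 + 1))
          (PySem.Dict.empty : PySem.Dict Int Int)
      = ((PySem.List.pyRange 0 (radius + 1) 1).map
          (fun y => PySem.List.pyGetD mt y 0)).foldl
          (fun d v => d.insert v (d.getD v 0 + 1))
          (PySem.Dict.empty : PySem.Dict Int Int) :=
    (@List.foldl_map Int Int (PySem.Dict Int Int)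
      (fun y => PySem.List.pyGetD mt y 0)
      (fun d v => d.insert v (d.getD v 0 + 1))
      (PySem.List.pyRange 0 (radius + 1) 1) PySem.Dict.empty).symm
  rw [hB, PySem.Dict.getD_foldl_insert_add_one, PySem.Dict.getD_empty, Int.zero_add]

-- ===== VERDICT (by name: the statement is the Claim_ definition above) =====
theorem calc_unary_invariant_vec_spec : Claim_equal_calc_unary_invariant_vec := by
  intro radius mt _ hpre
  unfold Spec_calc_unary_invariant_vec calc_unary_invariant_vec calc_unary_invariant_vec_alt
  by_cases hneg : radius + 1 ≤ 0
  · rw [PySem.List.pyRange_one_eq_nil (by omega)]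
    simp
  · set n : Nat := (radius + 1).toNat with hn
    have hcast : (radius + 1 : Int) = (n : Int) := by
      rw [hn, Int.toNat_of_nonneg (by omega)]
    have hrng : PySem.List.pyRange 0 (radius + 1) 1
        = (List.range n).map (fun k : Nat => (k : Int)) := by
      rw [hcast]; exact PySem.List.pyRange_zero_natCast n
    have hnodup : (PySem.List.pyRange 0 (radius + 1) 1).Nodup :=
      PySem.List.nodup_pyRange_one 0 (radius + 1)
    have hinit : (PySem.List.pyRange 0 (radius + 1) 1).map (fun _ => ([] : List Int))
        = (List.range n).map (fun _ => ([] : List Int)) := by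
      rw [hrng, List.map_map]; rfl
    rw [hinit]
    have hfold : PySem.List.pyRange 0 (radius + 1) 1 = PySem.List.pyRange 0 (n : Int) 1 := by
      rw [hcast]
    rw [hfold, pvFoldA mt _ n n le_rfl]
    have hrng' : PySem.List.pyRange 0 ((n : Nat) : Int) 1
        = (List.range n).map (fun k : Nat => (k : Int)) := PySem.List.pyRange_zero_natCast n
    rw [hrng', List.map_map]
    apply List.map_congr_left
    intro k hk
    have hkn : k < n := List.mem_range.mp hk
    simp only [Function.comp, if_pos hkn, pvRowA]
    congr 1
    congr 1
    rw [pvCountsB_getD radius mt (k : Int)]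
    rw [hcast, hrng']
    rw [pvCount _ (by rw [← hrng']; exact PySem.List.nodup_pyRange_one 0 (n : Int))
      (fun y => PySem.List.pyGetD mt y 0) (k : Int)]
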